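-- pv_equiv track=rewrite | github.com/dflat/launchpad | LaunchpadSprite/launchpad.py | build_padmap
-- ===== SOURCE A (Python) =====
-- def build_padmap(start=81, stop=1, step=-10, cols=8):
--     """
--     Maps pad index (0-64) => Launchpad Developer Mode default midi notes
--     """
--     padmap = {}
--     i = 0
--     for start in range(start, stop, step):
--         for offset in range(cols):
--             padmap[i] = (start + offset)
--             i += 1
--     return padmap
-- ===== SOURCE B (Python) =====
-- def build_padmap(start=81, stop=1, step=-10, cols=8):
--     """
--     Maps pad index (0-64) => Launchpad Developer Mode default midi notes
--     """
--     n = len(range(start, stop, step))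
--     return {i: start + (i // cols) * step + i % cols for i in range(n * cols)}
-- ===== Notes on version B (the rewrite author's own statement) =====
-- stated objective: simpler
-- what changed: Replaces the nested row/column loops with a manual running counter by computing the row count once via len(range(start,stop,step)) and building the dict in one flat comprehension over range(n*cols), deriving each value by closed-form index arithmetic start + (i//cols)*step + i%cols.
import Mathlib
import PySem

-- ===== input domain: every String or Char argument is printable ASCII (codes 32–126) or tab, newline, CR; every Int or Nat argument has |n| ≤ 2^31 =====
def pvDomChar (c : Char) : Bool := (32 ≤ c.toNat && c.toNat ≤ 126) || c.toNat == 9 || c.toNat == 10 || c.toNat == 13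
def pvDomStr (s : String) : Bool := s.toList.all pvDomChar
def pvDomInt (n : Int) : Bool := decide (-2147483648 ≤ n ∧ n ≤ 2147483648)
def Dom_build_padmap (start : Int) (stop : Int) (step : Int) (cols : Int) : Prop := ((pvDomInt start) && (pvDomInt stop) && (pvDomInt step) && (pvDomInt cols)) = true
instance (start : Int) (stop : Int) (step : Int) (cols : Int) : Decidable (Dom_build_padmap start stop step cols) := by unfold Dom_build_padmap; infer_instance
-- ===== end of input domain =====

-- B replaces A's nested row/column loops and running counter by one flat pass with
-- closed-form index arithmetic (row = i // cols, col = i % cols); objective: simpler.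


-- ===== PORT A =====
def build_padmap (start : Int) (stop : Int) (step : Int) (cols : Int) : List (Int × Int) :=
  ((PySem.List.pyRange start stop step).foldl
    (fun (s : PySem.Dict Int Int × Int) r =>
      (PySem.List.pyRange 0 cols 1).foldl
        (fun (s : PySem.Dict Int Int × Int) offset =>
          (s.1.insert s.2 (r + offset), s.2 + 1)) s)
    (PySem.Dict.empty, 0)).1.items

-- ===== PORT B =====
def build_padmap_alt (start : Int) (stop : Int) (step : Int) (cols : Int) : List (Int × Int) :=
  let n : Int := (PySem.List.pyRange start stop step).length
  ((PySem.List.pyRange 0 (n * cols) 1).foldl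
    (fun (d : PySem.Dict Int Int) i =>
      d.insert i (start + PySem.Int.floordiv i cols * step + PySem.Int.mod i cols))
    PySem.Dict.empty).items

-- ===== PRECONDITION & SPEC =====
-- Python's range(start, stop, 0) raises ValueError in A (and in B): step = 0 is excluded.
def Pre_build_padmap (start : Int) (stop : Int) (step : Int) (cols : Int) : Prop := step ≠ 0
instance (start : Int) (stop : Int) (step : Int) (cols : Int) : Decidable (Pre_build_padmap start stop step cols) := by unfold Pre_build_padmap; infer_instance
def pvWitness_build_padmap : Int × Int × Int × Int := (81, 1, -10, 8)

def Spec_build_padmap (start : Int) (stop : Int) (step : Int) (cols : Int) (out : List (Int × Int)) : Prop := out = build_padmap_alt start stop step cols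
instance (start : Int) (stop : Int) (step : Int) (cols : Int) (out : List (Int × Int)) : Decidable (Spec_build_padmap start stop step cols out) := by unfold Spec_build_padmap; infer_instance

-- ===== CLAIM (what is proved, stated in full; the proofs are below) =====
def Claim_equal_build_padmap : Prop := ∀ (start : Int) (stop : Int) (step : Int) (cols : Int), Dom_build_padmap start stop step cols → Pre_build_padmap start stop step cols → Spec_build_padmap start stop step cols (build_padmap start stop step cols)

-- ===== LEMMAS AND PROOFS =====

-- indexing into pyRange with an arbitrary nonzero step
lemma getElem_pyRange_of_ne_zero (a b s : Int) (hs : s ≠ 0) (q : Nat)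
    (hq : q < (PySem.List.pyRange a b s).length) :
    (PySem.List.pyRange a b s)[q] = a + s * q := by
  simp [PySem.List.pyRange, hs] at hq ⊢

-- indexing into a flatMap whose chunks all have length c
lemma getElem_flatMap_const {α : Type} (g : Int → List α) (c : Nat)
    (hc : ∀ r, (g r).length = c) :
    ∀ (rows : List Int) (k : Nat) (h1 : k < (rows.flatMap g).length)
      (h2 : k / c < rows.length) (h3 : k % c < c),
      (rows.flatMap g)[k] = (g rows[k / c])[k % c]'(by rw [hc]; exact h3) := by
  intro rows
  induction rows with
  | nil => intro k h1 h2 h3; simp at h2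
  | cons r t ih =>
    intro k h1 h2 h3
    have hc0 : 0 < c := by omega
    by_cases hk : k < c
    · have hdiv : k / c = 0 := Nat.div_eq_of_lt hk
      have hmod : k % c = k := Nat.mod_eq_of_lt hk
      simp only [List.flatMap_cons]
      rw [List.getElem_append_left (by rw [hc]; exact hk)]
      simp [hdiv, hmod]
    · have hck : c ≤ k := Nat.le_of_not_lt hk
      obtain ⟨k', rfl⟩ : ∃ k', k = c + k' := ⟨k - c, by omega⟩
      have hdiv : (c + k') / c = k' / c + 1 := by
        rw [Nat.add_comm]; exact Nat.add_div_right k' hc0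
      have hmod : (c + k') % c = k' % c := Nat.add_mod_left c k'
      have h1' : k' < (t.flatMap g).length := by
        simp only [List.flatMap_cons, List.length_append, hc] at h1; omega
      have h2' : k' / c < t.length := by
        rw [hdiv] at h2; simpa using h2
      simp only [List.flatMap_cons]
      rw [List.getElem_append_right (by rw [hc]; omega)]
      have := ih k' h1' h2' (by rw [← hmod]; exact h3)
      simp only [hc, hdiv, hmod]
      simpa [Nat.add_sub_cancel_left, hc] using this

-- the interleaved (dict, counter) loop over a flat value list appends fresh keys in order
lemma flatfold (vs : List Int) :
    ∀ (d : PySem.Dict Int Int) (i : Int), (∀ k ∈ d.keys, k < i) →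
    vs.foldl (fun (s : PySem.Dict Int Int × Int) v => (s.1.insert s.2 v, s.2 + 1)) (d, i)
      = (PySem.Dict.mk (d.items ++ (PySem.List.pyRange i (i + vs.length) 1).zip vs),
         i + vs.length) := by
  induction vs with
  | nil =>
    intro d i _
    simp only [List.foldl_nil, List.length_nil, Nat.cast_zero, List.zip_nil_right,
      List.append_nil, add_zero]
  | cons v t ih =>
    intro d i h
    have hfresh : d.contains i = false := by
      by_contra hcon
      have hb : d.contains i = true := by revert hcon; cases d.contains i <;> simp
      have hm := (PySem.Dict.contains_iff_mem_keys d i).1 hb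
      have := h i hm; omega
    have hins : (d.insert i v).items = d.items ++ [(i, v)] :=
      PySem.Dict.items_insert_of_not_contains d v hfresh
    have hkeys : ∀ k ∈ (d.insert i v).keys, k < i + 1 := by
      intro k hk
      rcases (PySem.Dict.mem_keys_insert d i k v).1 hk with h' | h'
      · omega
      · exact lt_trans (h k h') (by omega)
    simp only [List.foldl_cons]
    rw [ih (d.insert i v) (i + 1) hkeys]
    have hrng : PySem.List.pyRange i (i + ((v :: t).length : Int)) 1
        = i :: PySem.List.pyRange (i + 1) (i + ((v :: t).length : Int)) 1 := by
      apply PySem.List.pyRange_one_cons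
      simp only [List.length_cons, Nat.cast_add, Nat.cast_one]; omega
    have harg : i + ((v :: t).length : Int) = i + 1 + (t.length : Int) := by
      simp only [List.length_cons, Nat.cast_add, Nat.cast_one]; omega
    simp only [Prod.mk.injEq]
    refine ⟨?_, by simp only [List.length_cons, Nat.cast_add, Nat.cast_one]; omega⟩
    apply PySem.Dict.ext
    rw [hrng]
    simp only [hins, harg, List.zip_cons_cons, List.append_assoc, List.singleton_append]

-- B's fold over fresh distinct keys, spelled out as a map
lemma alt_items (start stop step cols : Int) :
    build_padmap_alt start stop step cols
      = (PySem.List.pyRange 0 (((PySem.List.pyRange start stop step).length : Int) * cols) 1).map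
          (fun i => (i, start + PySem.Int.floordiv i cols * step + PySem.Int.mod i cols)) := by
  unfold build_padmap_alt
  rw [PySem.Dict.items_foldl_insert_fresh _ (fun i => i)
        (fun i => start + PySem.Int.floordiv i cols * step + PySem.Int.mod i cols)
        PySem.Dict.empty (by intro a _; exact PySem.Dict.contains_empty a)
        (by simpa using PySem.List.nodup_pyRange_one 0 (((PySem.List.pyRange start stop step).length : Int) * cols))]
  have hempty : (PySem.Dict.empty : PySem.Dict Int Int).items = [] := by
    have h := @PySem.Dict.keys_empty Int Int
    simp only [PySem.Dict.keys] at h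
    exact List.map_eq_nil_iff.mp h
  simp [hempty]

-- ===== VERDICT (by name: the statement is the Claim_ definition above) =====
theorem build_padmap_spec : Claim_equal_build_padmap := by
  intro start stop step cols _ hpre
  unfold Spec_build_padmap
  have hempty : (PySem.Dict.empty : PySem.Dict Int Int).items = [] := by
    have h := @PySem.Dict.keys_empty Int Int
    simp only [PySem.Dict.keys] at h
    exact List.map_eq_nil_iff.mp h
  have hkempty : (PySem.Dict.empty : PySem.Dict Int Int).keys = [] := PySem.Dict.keys_empty
  -- A as a zip of the key range with the flattened value list
  have hA : build_padmap start stop step cols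
      = (PySem.List.pyRange 0 (((PySem.List.pyRange start stop step).flatMap
            (fun r => (PySem.List.pyRange 0 cols 1).map (r + ·))).length : Int) 1).zip
          ((PySem.List.pyRange start stop step).flatMap
            (fun r => (PySem.List.pyRange 0 cols 1).map (r + ·))) := by
    unfold build_padmap
    have hfold : ∀ (s : PySem.Dict Int Int × Int) (r : Int),
        (PySem.List.pyRange 0 cols 1).foldl
          (fun (s : PySem.Dict Int Int × Int) offset => (s.1.insert s.2 (r + offset), s.2 + 1)) s
        = ((PySem.List.pyRange 0 cols 1).map (r + ·)).foldl
            (fun (s : PySem.Dict Int Int × Int) v => (s.1.insert s.2 v, s.2 + 1)) s := by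
      intro s r; rw [List.foldl_map]
    have hflat : (PySem.List.pyRange start stop step).foldl
        (fun (s : PySem.Dict Int Int × Int) r =>
          (PySem.List.pyRange 0 cols 1).foldl
            (fun (s : PySem.Dict Int Int × Int) offset => (s.1.insert s.2 (r + offset), s.2 + 1)) s)
        (PySem.Dict.empty, 0)
      = ((PySem.List.pyRange start stop step).flatMap
            (fun r => (PySem.List.pyRange 0 cols 1).map (r + ·))).foldl
          (fun (s : PySem.Dict Int Int × Int) v => (s.1.insert s.2 v, s.2 + 1))
          (PySem.Dict.empty, 0) := by
      rw [List.foldl_flatMap]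
      exact List.foldl_ext _ _ _ (fun a x hx => hfold a x)
    rw [hflat, flatfold _ PySem.Dict.empty 0 (by intro k hk; rw [hkempty] at hk; simp at hk)]
    simp [hempty]
  rw [hA, alt_items]
  by_cases hcols : cols ≤ 0
  · -- both sides are empty
    have hoffs : PySem.List.pyRange 0 cols 1 = [] := PySem.List.pyRange_one_eq_nil hcols
    have hn : (((PySem.List.pyRange start stop step).length : Int)) * cols ≤ 0 :=
      mul_nonpos_of_nonneg_of_nonpos (by positivity) hcols
    simp [hoffs, PySem.List.pyRange_one_eq_nil hn]
  · rw [not_le] at hcols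
    set c : Nat := cols.toNat with hc
    have hcolsc : (c : Int) = cols := Int.toNat_of_nonneg (by omega)
    have hlen_off : (PySem.List.pyRange 0 cols 1).length = c := by
      rw [PySem.List.length_pyRange_one]; omega
    have hchunk : ∀ r : Int, ((PySem.List.pyRange 0 cols 1).map (r + ·)).length = c := by
      intro r; simp [hlen_off]
    have hlenflat : ((PySem.List.pyRange start stop step).flatMap
          (fun r => (PySem.List.pyRange 0 cols 1).map (r + ·))).length
        = (PySem.List.pyRange start stop step).length * c := by
      rw [List.length_flatMap]
      have hrep : (PySem.List.pyRange start stop step).map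
            (fun r => ((PySem.List.pyRange 0 cols 1).map (r + ·)).length)
          = List.replicate ((PySem.List.pyRange start stop step).map
              (fun r => ((PySem.List.pyRange 0 cols 1).map (r + ·)).length)).length c := by
        apply List.eq_replicate_of_mem
        intro x hx
        rcases List.mem_map.1 hx with ⟨r, _, rfl⟩
        exact hchunk r
      rw [hrep, List.sum_replicate, smul_eq_mul]
      simp [List.length_map]
    have hNint : (((PySem.List.pyRange start stop step).length : Int)) * cols
        = (((PySem.List.pyRange start stop step).length * c : Nat) : Int) := by
      push_cast [hcolsc]; ring
    have hlenB : (PySem.List.pyRange 0 ((((PySem.List.pyRange start stop step).length : Int)) * cols) 1).length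
        = (PySem.List.pyRange start stop step).length * c := by
      rw [PySem.List.length_pyRange_one, hNint]; omega
    apply List.ext_getElem
    · rw [List.length_zip, List.length_map, hlenB, PySem.List.length_pyRange_one, hlenflat]
      simp
      rw [← Nat.cast_mul, Int.toNat_natCast]
    · intro k hk1 hk2
      have hkN : k < (PySem.List.pyRange start stop step).length * c := by
        simpa [hlenB] using hk2
      have hc0 : 0 < c := by omega
      have hmodlt : k % c < c := Nat.mod_lt _ hc0
      have hdivlt : k / c < (PySem.List.pyRange start stop step).length := by
        have h' := hkN; rw [Nat.mul_comm] at h'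
        exact Nat.div_lt_of_lt_mul h'
      rw [List.getElem_zip, List.getElem_map]
      rw [getElem_flatMap_const _ c hchunk _ k (hlenflat ▸ hkN) hdivlt hmodlt]
      rw [List.getElem_map]
      have hrowq : (PySem.List.pyRange start stop step)[k / c] = start + step * ((k / c : Nat) : Int) :=
        getElem_pyRange_of_ne_zero start stop step hpre (k / c) hdivlt
      have hfd : PySem.Int.floordiv (k : Int) cols = ((k / c : Nat) : Int) := by
        rw [← hcolsc]; exact_mod_cast PySem.Int.floordiv_natCast k c
      have hmd : PySem.Int.mod (k : Int) cols = ((k % c : Nat) : Int) := by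
        rw [← hcolsc]; exact_mod_cast PySem.Int.mod_natCast k c
      simp only [PySem.List.getElem_pyRange_one, zero_add]
      rw [hrowq, hfd, hmd]
      simp only [Prod.mk.injEq]
      exact ⟨trivial, by ring⟩
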